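-- pv_equiv track=rewrite | github.com/berazo29/mark-down | src/marker.py | merge_tokens_paragraph
-- ===== SOURCE A (Python) =====
-- from typing import Final
--
-- PARAGRAPH: Final = 'PARAGRAPH'
--
-- def merge_tokens_paragraph(tokens: list) -> list:
--     merged_tokens = []
--     for token in tokens:
--         if token[0] == PARAGRAPH:
--             if len(merged_tokens) > 0 and merged_tokens[-1][0] == PARAGRAPH:
--                 merged_tokens[-1][1] += token[1]
--             else:
--                 merged_tokens.append(token)
--         else:
--             merged_tokens.append(token)
--     return merged_tokens
-- ===== SOURCE B (Python) =====
-- from itertools import groupby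
--
-- PARAGRAPH = 'PARAGRAPH'
--
-- def merge_tokens_paragraph(tokens: list) -> list:
--     result = []
--     for is_par, grp in groupby(tokens, key=lambda t: t[0] == PARAGRAPH):
--         if is_par:
--             run = list(grp)
--             first = run[0]
--             for t in run[1:]:
--                 first[1] += t[1]
--             result.append(first)
--         else:
--             result.extend(grp)
--     return result
-- ===== Notes on version B (the rewrite author's own statement) =====
-- stated objective: idiomatic
-- what changed: B partitions the token stream into maximal runs with itertools.groupby and folds each PARAGRAPH run into its first token, instead of A's per-token loop that re-inspects merged_tokens[-1] on every iteration.
import Mathlib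
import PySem

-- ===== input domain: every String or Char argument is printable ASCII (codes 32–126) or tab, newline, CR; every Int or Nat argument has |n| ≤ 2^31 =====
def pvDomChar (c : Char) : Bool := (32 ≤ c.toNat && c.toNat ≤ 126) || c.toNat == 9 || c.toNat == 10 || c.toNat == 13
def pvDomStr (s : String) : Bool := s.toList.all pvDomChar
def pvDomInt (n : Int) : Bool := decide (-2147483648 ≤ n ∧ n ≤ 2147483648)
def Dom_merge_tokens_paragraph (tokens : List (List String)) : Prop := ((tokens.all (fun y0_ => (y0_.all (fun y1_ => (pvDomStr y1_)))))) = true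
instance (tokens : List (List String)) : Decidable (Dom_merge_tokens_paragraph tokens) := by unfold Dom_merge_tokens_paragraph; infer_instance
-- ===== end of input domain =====

-- PORT NOTE: both Pythons mutate the first token of each PARAGRAPH run in place (`first[1] += …`);
-- the equivalence proved here is about the RETURN value only.

-- shared accessor: t[i] as a total String read (under Pre_ every read Python performs is in range)
def pvGetS (t : List String) (i : Int) : String := (PySem.List.pyGet? t i).getD ""

-- ===== PORT A =====
-- literal transliteration of A's loop body (merged_tokens[-1][1] += token[1] becomes set 1)
def pvStepA (merged : List (List String)) (token : List String) : List (List String) :=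
  if pvGetS token 0 = "PARAGRAPH" then
    if 0 < merged.length ∧ pvGetS ((PySem.List.pyGet? merged (-1)).getD []) 0 = "PARAGRAPH" then
      merged.dropLast ++
        [((PySem.List.pyGet? merged (-1)).getD []).set 1
          (pvGetS ((PySem.List.pyGet? merged (-1)).getD []) 1 ++ pvGetS token 1)]
    else merged ++ [token]
  else merged ++ [token]

def merge_tokens_paragraph (tokens : List (List String)) : List (List String) :=
  tokens.foldl pvStepA []

-- ===== PORT B =====
-- first = run[0]; for t in run[1:]: first[1] += t[1]
def pvMergeRun (run : List (List String)) : List String :=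
  match run with
  | [] => []
  | first :: rest => rest.foldl (fun f u => f.set 1 (pvGetS f 1 ++ pvGetS u 1)) first

-- groupby: peel off one maximal run of equal key at a time
def merge_tokens_paragraph_alt : List (List String) → List (List String)
  | [] => []
  | t :: rest =>
    let k := pvGetS t 0 == "PARAGRAPH"
    let run := t :: rest.takeWhile (fun u => (pvGetS u 0 == "PARAGRAPH") == k)
    let rem := rest.dropWhile (fun u => (pvGetS u 0 == "PARAGRAPH") == k)
    (if k then [pvMergeRun run] else run) ++ merge_tokens_paragraph_alt rem
termination_by l => l.length
decreasing_by
  simp only [List.length_cons]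
  exact Nat.lt_succ_of_le (List.length_dropWhile_le _ _)

-- ===== PRECONDITION & SPEC =====
-- Pre_ excludes exactly the inputs on which Python A raises IndexError: a token with no fields
-- (token[0]), or two adjacent PARAGRAPH tokens one of which lacks field [1] (the merge reads both).
def Pre_merge_tokens_paragraph (tokens : List (List String)) : Prop :=
  (∀ t ∈ tokens, t ≠ []) ∧
  ∀ p ∈ tokens.zip tokens.tail,
    p.1.head? = some "PARAGRAPH" → p.2.head? = some "PARAGRAPH" →
      2 ≤ p.1.length ∧ 2 ≤ p.2.length
instance (tokens : List (List String)) : Decidable (Pre_merge_tokens_paragraph tokens) := by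
  unfold Pre_merge_tokens_paragraph; infer_instance

def pvWitness_merge_tokens_paragraph : List (List String) :=
  [["PARAGRAPH", "a"], ["PARAGRAPH", "b"], ["TEXT", "c"], ["PARAGRAPH", "d"]]

def Spec_merge_tokens_paragraph (tokens : List (List String)) (out : List (List String)) : Prop := out = merge_tokens_paragraph_alt tokens
instance (tokens : List (List String)) (out : List (List String)) : Decidable (Spec_merge_tokens_paragraph tokens out) := by unfold Spec_merge_tokens_paragraph; infer_instance

-- ===== CLAIM (what is proved, stated in full; the proofs are below) =====
def Claim_equal_merge_tokens_paragraph : Prop := ∀ (tokens : List (List String)), Dom_merge_tokens_paragraph tokens → Pre_merge_tokens_paragraph tokens → Spec_merge_tokens_paragraph tokens (merge_tokens_paragraph tokens)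

-- ===== LEMMAS AND PROOFS =====

-- the key of a token is unchanged by setting field 1
theorem pvGetS_set_one (t : List String) (x : String) : pvGetS (t.set 1 x) 0 = pvGetS t 0 := by
  simp [pvGetS, PySem.List.pyGet?_zero, List.getElem?_set_ne]

-- a non-PARAGRAPH token is just appended
theorem pvStepA_nonpara (merged : List (List String)) (token : List String)
    (h : ¬ pvGetS token 0 = "PARAGRAPH") : pvStepA merged token = merged ++ [token] := by
  simp [pvStepA, h]

-- a PARAGRAPH token after a non-para (or empty) tail is appended
theorem pvStepA_para_fresh (merged : List (List String)) (token : List String)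
    (h : merged = [] ∨ ¬ pvGetS (merged.getLastD []) 0 = "PARAGRAPH") :
    pvStepA merged token = merged ++ [token] := by
  rcases h with h | h
  · subst h; simp [pvStepA]
  · unfold pvStepA
    split
    · rw [if_neg]
      rintro ⟨hl, hp⟩
      rcases List.eq_nil_or_concat merged with h0 | ⟨ms, m, rfl⟩
      · simp [h0] at hl
      · simp [PySem.List.pyGet?_neg_one_append_singleton] at hp
        simp at h
        exact h hp
    · rfl

-- a PARAGRAPH token after a PARAGRAPH tail merges into the last token
theorem pvStepA_para_merge (ms : List (List String)) (m token : List String)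
    (hm : pvGetS m 0 = "PARAGRAPH") (ht : pvGetS token 0 = "PARAGRAPH") :
    pvStepA (ms ++ [m]) token = ms ++ [m.set 1 (pvGetS m 1 ++ pvGetS token 1)] := by
  unfold pvStepA
  rw [if_pos ht, if_pos]
  · simp [PySem.List.pyGet?_neg_one_append_singleton]
  · constructor
    · simp
    · simpa [PySem.List.pyGet?_neg_one_append_singleton] using hm

-- fold a run of non-PARAGRAPH tokens: pure appends
theorem pvFold_nonpara (pre : List (List String)) (merged : List (List String))
    (h : ∀ u ∈ pre, ¬ pvGetS u 0 = "PARAGRAPH") :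
    pre.foldl pvStepA merged = merged ++ pre := by
  induction pre generalizing merged with
  | nil => simp
  | cons u pre ih =>
    rw [List.foldl_cons, pvStepA_nonpara _ _ (h u (by simp)), ih _ (fun v hv => h v (by simp [hv]))]
    simp

-- fold a run of PARAGRAPH tokens after a last PARAGRAPH token acc: merge all into acc
theorem pvFold_para (pre : List (List String)) (ms : List (List String)) (acc : List String)
    (hacc : pvGetS acc 0 = "PARAGRAPH")
    (h : ∀ u ∈ pre, pvGetS u 0 = "PARAGRAPH") :
    pre.foldl pvStepA (ms ++ [acc]) =
      ms ++ [pre.foldl (fun f u => f.set 1 (pvGetS f 1 ++ pvGetS u 1)) acc] := by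
  induction pre generalizing acc with
  | nil => simp
  | cons u pre ih =>
    rw [List.foldl_cons, pvStepA_para_merge ms acc u hacc (h u (by simp)),
      List.foldl_cons, ih _ (by rw [pvGetS_set_one]; exact hacc) (fun v hv => h v (by simp [hv]))]

-- the head of a dropWhile suffix fails the predicate
theorem pvDropWhile_head {α : Type} (P : α → Bool) (l : List α) (u : α)
    (hu : (l.dropWhile P).head? = some u) : P u = false := by
  induction l with
  | nil => simp at hu
  | cons a l ih =>
    by_cases h : P a
    · rw [List.dropWhile_cons_of_pos h] at hu
      exact ih hu
    · rw [List.dropWhile_cons_of_neg h] at hu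
      simp at hu
      subst hu
      simpa using h

-- main invariant: from a state whose last token is not PARAGRAPH whenever the next token is,
-- A's fold appends exactly what B produces for the remaining tokens
theorem pvMain : ∀ (n : Nat) (tokens merged : List (List String)), tokens.length ≤ n →
    (∀ t, tokens.head? = some t → pvGetS t 0 = "PARAGRAPH" →
      merged = [] ∨ ¬ pvGetS (merged.getLastD []) 0 = "PARAGRAPH") →
    tokens.foldl pvStepA merged = merged ++ merge_tokens_paragraph_alt tokens := by
  intro n
  induction n with
  | zero =>
    intro tokens merged hlen _
    have : tokens = [] := List.eq_nil_of_length_eq_zero (Nat.le_zero.mp hlen)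
    subst this; simp [merge_tokens_paragraph_alt]
  | succ n ih =>
    intro tokens merged hlen hyp
    match tokens with
    | [] => simp [merge_tokens_paragraph_alt]
    | t :: rest =>
      by_cases hk : pvGetS t 0 = "PARAGRAPH"
      · -- PARAGRAPH run
        have h1 : pvStepA merged t = merged ++ [t] :=
          pvStepA_para_fresh merged t (hyp t rfl hk)
        set pre := rest.takeWhile (fun u => (pvGetS u 0 == "PARAGRAPH") == (pvGetS t 0 == "PARAGRAPH")) with hpre
        set rem := rest.dropWhile (fun u => (pvGetS u 0 == "PARAGRAPH") == (pvGetS t 0 == "PARAGRAPH")) with hrem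
        have hsplit : rest = pre ++ rem := (List.takeWhile_append_dropWhile ..).symm
        have hprep : ∀ u ∈ pre, pvGetS u 0 = "PARAGRAPH" := by
          intro u hu
          have := List.mem_takeWhile_imp (hpre ▸ hu)
          simpa [hk] using this
        have hremhead : ∀ u, rem.head? = some u → ¬ pvGetS u 0 = "PARAGRAPH" := by
          intro u hu hcon
          have := pvDropWhile_head _ rest u (hrem ▸ hu)
          simp [hk, hcon] at this
        conv_lhs => rw [List.foldl_cons, h1, hsplit]
        rw [List.foldl_append,
          pvFold_para pre merged t hk hprep,
          ih rem _ (by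
            have : rem.length ≤ rest.length := hrem ▸ List.length_dropWhile_le _ _
            have : rest.length ≤ n := Nat.lt_succ_iff.mp (by simpa using hlen)
            omega)
            (by
              intro u hu hup
              exact absurd hup (hremhead u hu))]
        conv_rhs => rw [show merge_tokens_paragraph_alt (t :: rest) =
          (if (pvGetS t 0 == "PARAGRAPH") then [pvMergeRun (t :: pre)] else t :: pre) ++
            merge_tokens_paragraph_alt rem from by rw [merge_tokens_paragraph_alt]]
        simp [hk, pvMergeRun]
      · -- non-PARAGRAPH run
        have h1 : pvStepA merged t = merged ++ [t] := pvStepA_nonpara merged t hk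
        set pre := rest.takeWhile (fun u => (pvGetS u 0 == "PARAGRAPH") == (pvGetS t 0 == "PARAGRAPH")) with hpre
        set rem := rest.dropWhile (fun u => (pvGetS u 0 == "PARAGRAPH") == (pvGetS t 0 == "PARAGRAPH")) with hrem
        have hsplit : rest = pre ++ rem := (List.takeWhile_append_dropWhile ..).symm
        have hprep : ∀ u ∈ pre, ¬ pvGetS u 0 = "PARAGRAPH" := by
          intro u hu
          have := List.mem_takeWhile_imp (hpre ▸ hu)
          simpa [hk] using this
        have hlast : ¬ pvGetS ((merged ++ t :: pre).getLastD []) 0 = "PARAGRAPH" := by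
          rw [List.getLastD_eq_getLast?, List.getLast?_append_of_ne_nil _ (by simp),
            ← List.getLastD_eq_getLast?]
          rcases List.eq_nil_or_concat pre with h0 | ⟨ps, p, hp⟩
          · simpa [h0] using hk
          · rw [hp, show t :: ps.concat p = (t :: ps) ++ [p] from by simp, List.getLastD_concat]
            exact hprep p (by simp [hp])
        conv_lhs => rw [List.foldl_cons, h1, hsplit]
        rw [List.foldl_append,
          pvFold_nonpara pre (merged ++ [t]) hprep,
          show merged ++ [t] ++ pre = merged ++ t :: pre from by simp,
          ih rem _ (by
            have : rem.length ≤ rest.length := hrem ▸ List.length_dropWhile_le _ _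
            have : rest.length ≤ n := Nat.lt_succ_iff.mp (by simpa using hlen)
            omega)
            (fun u _ _ => Or.inr hlast)]
        conv_rhs => rw [show merge_tokens_paragraph_alt (t :: rest) =
          (if (pvGetS t 0 == "PARAGRAPH") then [pvMergeRun (t :: pre)] else t :: pre) ++
            merge_tokens_paragraph_alt rem from by rw [merge_tokens_paragraph_alt]]
        simp [hk]

-- ===== VERDICT (by name: the statement is the Claim_ definition above) =====
theorem merge_tokens_paragraph_spec : Claim_equal_merge_tokens_paragraph := by
  intro tokens _ _
  unfold Spec_merge_tokens_paragraph merge_tokens_paragraph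
  simpa using pvMain tokens.length tokens [] le_rfl (fun _ _ _ => Or.inl rfl)
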